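-- pv_equiv track=rewrite | github.com/WithoutHaste/RecreationalMath | pythonGenerators/generate_figurate.py | generate_square
-- ===== SOURCE A (Python) =====
-- def generate_square(max):
-- 	""" Returns an array of square numbers from 1 to max """
-- 	if max <= 0:
-- 		raise Exception('generate_square requires a positive integer')
--
-- 	is_square = []
-- 	n = 1
-- 	while True:
-- 		square = n * n
-- 		if square > max:
-- 			break
-- 		is_square.append(square)
-- 		n = n + 1
--
-- 	return is_square
-- ===== SOURCE B (Python) =====
-- import math
--
-- def generate_square(max):
-- 	""" Returns an array of square numbers from 1 to max """
-- 	if max <= 0: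
-- 		raise Exception('generate_square requires a positive integer')
-- 	limit = math.isqrt(math.floor(max))
-- 	return [n * n for n in range(1, limit + 1)]
-- ===== Notes on version B (the rewrite author's own statement) =====
-- stated objective: simpler
-- what changed: Replaces the open-ended while-with-break by computing the count of squares up front with math.isqrt and emitting them in one bounded list comprehension.
import Mathlib
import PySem

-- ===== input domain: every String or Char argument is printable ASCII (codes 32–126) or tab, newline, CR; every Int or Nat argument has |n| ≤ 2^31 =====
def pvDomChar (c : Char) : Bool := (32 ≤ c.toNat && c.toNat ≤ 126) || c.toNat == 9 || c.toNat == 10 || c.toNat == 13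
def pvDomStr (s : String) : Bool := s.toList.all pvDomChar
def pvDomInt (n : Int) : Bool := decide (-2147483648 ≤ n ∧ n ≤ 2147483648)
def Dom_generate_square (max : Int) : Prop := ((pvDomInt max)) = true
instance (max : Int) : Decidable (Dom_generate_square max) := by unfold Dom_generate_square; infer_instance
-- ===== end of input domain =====

-- B lists the squares by first computing their count with isqrt instead of A's open-ended while-with-break (objective: simpler).

-- ===== PORT A =====
-- A's while loop, appending n*n while n*n ≤ max; the 'n < 1' disjunct is a totality
-- guard only (the loop is always entered with n = 1).
def genLoopA (max n : Int) : List Int :=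
  if n * n > max ∨ n < 1 then []
  else (n * n) :: genLoopA max (n + 1)
termination_by (max + 1 - n).toNat
decreasing_by
  rename_i h
  push Not at h
  have h1 : n ≤ n * n := by nlinarith [h.2]
  omega

def generate_square (max : Int) : List Int :=
  if max ≤ 0 then []           -- Python raises here; excluded by Pre_
  else genLoopA max 1

-- ===== PORT B =====
def generate_square_alt (max : Int) : List Int :=
  if max ≤ 0 then []           -- Python raises here; excluded by Pre_
  else (PySem.List.pyRange 1 ((Nat.sqrt max.toNat : Int) + 1) 1).map (fun n => n * n)

-- ===== PRECONDITION & SPEC =====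
-- A raises Exception('generate_square requires a positive integer') for max ≤ 0.
def Pre_generate_square (max : Int) : Prop := 0 < max
instance (max : Int) : Decidable (Pre_generate_square max) := by unfold Pre_generate_square; infer_instance
def pvWitness_generate_square : Int := (10)

def Spec_generate_square (max : Int) (out : List Int) : Prop := out = generate_square_alt max
instance (max : Int) (out : List Int) : Decidable (Spec_generate_square max out) := by unfold Spec_generate_square; infer_instance

-- ===== CLAIM (what is proved, stated in full; the proofs are below) =====
def Claim_equal_generate_square : Prop := ∀ (max : Int), Dom_generate_square max → Pre_generate_square max → Spec_generate_square max (generate_square max)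

-- ===== LEMMAS AND PROOFS =====

theorem genLoopA_eq (max : Int) (hmax : 0 < max) :
    ∀ (f : Nat) (n : Int), (max + 1 - n).toNat ≤ f → 1 ≤ n →
      genLoopA max n = (PySem.List.pyRange n ((Nat.sqrt max.toNat : Int) + 1) 1).map (fun k => k * k) := by
  intro f
  induction f with
  | zero =>
    intro n hf hn
    have hb : max < n := by omega
    have hgt : n * n > max := by nlinarith [hb, hn]
    rw [genLoopA, if_pos (Or.inl hgt), PySem.List.pyRange_one]
    have hs : ((Nat.sqrt max.toNat : Int) + 1 - n).toNat = 0 := by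
      have := Nat.sqrt_le_self max.toNat
      omega
    simp [hs]
  | succ f ih =>
    intro n hf hn
    by_cases hgt : n * n > max
    · rw [genLoopA, if_pos (Or.inl hgt), PySem.List.pyRange_one]
      have hsq : max.toNat < n.toNat * n.toNat := by
        have hnt : (n.toNat : Int) = n := by omega
        have hmt : (max.toNat : Int) = max := by omega
        have : (max.toNat : Int) < (n.toNat : Int) * (n.toNat : Int) := by rw [hnt, hmt]; exact hgt
        exact_mod_cast this
      have hlt : Nat.sqrt max.toNat < n.toNat := Nat.sqrt_lt'.mpr (by rw [pow_two]; exact hsq)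
      have hs : ((Nat.sqrt max.toNat : Int) + 1 - n).toNat = 0 := by omega
      simp [hs]
    · push Not at hgt
      have hle : n ≤ (Nat.sqrt max.toNat : Int) := by
        have h1 : n.toNat * n.toNat ≤ max.toNat := by
          have hn' : (n.toNat : Int) = n := by omega
          have : (n.toNat * n.toNat : Int) ≤ (max.toNat : Int) := by push_cast [hn']; omega
          exact_mod_cast this
        have := Nat.le_sqrt.mpr h1
        omega
      rw [genLoopA, if_neg (by push Not; exact ⟨hgt, by omega⟩)]
      rw [PySem.List.pyRange_one_cons (by omega : n < (Nat.sqrt max.toNat : Int) + 1)]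
      simp only [List.map_cons]
      rw [ih (n + 1) (by omega) (by omega)]

-- ===== VERDICT (by name: the statement is the Claim_ definition above) =====
theorem generate_square_spec : Claim_equal_generate_square := by
  intro max _ hpre
  unfold Pre_generate_square at hpre
  unfold Spec_generate_square generate_square generate_square_alt
  rw [if_neg (by omega), if_neg (by omega)]
  exact genLoopA_eq max hpre ((max + 1 - 1).toNat) 1 le_rfl le_rfl
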